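-- pv_equiv track=rewrite | github.com/123R3N321/PTC | cs1114and1134/leetcode3440.py | solution
-- ===== SOURCE A (Python) =====
-- def maxheapPush(heap, elem):
--     heap.append(elem)
--     start = len(heap)-1
--     while start>0:
--         prev = (start-1)//2
--         if heap[prev]>=heap[start]:
--             break
--         else:
--             heap[start], heap[prev] = heap[prev], heap[start]
--             start = prev
--
-- def gapArrGen(total, starts, ends):
--     res = [starts[0]]
--     for i in range(1,len(starts)):
--         res.append(starts[i]-ends[i-1])
--     res.append(total - ends[-1])
--     return res
--
-- def slidingWindowFindDouble(gapArr):
--     res = gapArr[0] + gapArr[1] # gapArr has at least 2 elems as long as a meeting exists at all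
--     for i in range(2, len(gapArr)):
--         local = gapArr[i-1] + gapArr[i]
--         if local>res:
--             res = local
--     return res
--
-- def movabilityCheck(meetingDuration, meetingInd, taggedGapRank):
--
--     for eachGap, gapInd in taggedGapRank:
--         if meetingDuration>eachGap: return False
--         if gapInd-meetingInd==1 or gapInd-meetingInd==0: continue   #skip current gap check next gap
--         return True # meeting duration < gap, and meeting not sandwiched by this gap on either side, we good
--
-- def solution(totalTime, starts, ends):
--     gapArr = gapArrGen(totalTime, starts, ends) #we know all the gaps
--
--     taggedGapRank = []
--     for i in range(len(gapArr)):
--         taggedGapRank.append((gapArr[i], i))  #tag the ind pos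
--                                                 # meeting 0 is adjacent to gap 0 and 1, so on.
--     taggedGapRank = sorted(taggedGapRank, key=lambda x: x[0], reverse=True)   #key not necessary but good to have
--
--     heap = []
--     for i in range(len(starts)):    #guaranteed synched ind moving with ends
--         if movabilityCheck(ends[i]-starts[i], i, taggedGapRank):
--             maxheapPush(heap, ends[i]-starts[i]+gapArr[i]+gapArr[i+1]) #gapArr guaranteed len bigger by 1
--     double = slidingWindowFindDouble(gapArr) #in hind sight could simply be the last two elements[0] sum for taggedGapRank
--     return max(double, heap[0]) if heap else double
-- ===== SOURCE B (Python) =====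
-- def solution(totalTime, starts, ends):
--     n = len(starts)
--     # gap j sits before meeting j (last gap after the final meeting)
--     gaps = [starts[0]] + [s - e for s, e in zip(starts[1:], ends)] + [totalTime - ends[-1]]
--     best = max(x + y for x, y in zip(gaps, gaps[1:]))
--     # prefix and suffix running maxima of the gaps
--     pre = [gaps[0]]
--     for g in gaps[1:]:
--         pre.append(max(pre[-1], g))
--     suf = [gaps[-1]]
--     for g in reversed(gaps[:-1]):
--         suf.append(max(suf[-1], g))
--     suf.reverse()
--     for i in range(n):
--         dur = ends[i] - starts[i]
--         # meeting i may relocate iff some gap other than its two adjacent ones fits it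
--         if (i >= 1 and dur <= pre[i - 1]) or (i + 2 <= n and dur <= suf[i + 2]):
--             best = max(best, dur + gaps[i] + gaps[i + 1])
--     return best
-- ===== Notes on version B (the rewrite author's own statement) =====
-- stated objective: alternative
-- what changed: Replaces sorting all gaps, the per-meeting scan of the ranked gap list and the hand-rolled max-heap by prefix/suffix running maxima of the gaps giving an O(1) movability test per meeting and a plain running maximum.
import Mathlib
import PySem

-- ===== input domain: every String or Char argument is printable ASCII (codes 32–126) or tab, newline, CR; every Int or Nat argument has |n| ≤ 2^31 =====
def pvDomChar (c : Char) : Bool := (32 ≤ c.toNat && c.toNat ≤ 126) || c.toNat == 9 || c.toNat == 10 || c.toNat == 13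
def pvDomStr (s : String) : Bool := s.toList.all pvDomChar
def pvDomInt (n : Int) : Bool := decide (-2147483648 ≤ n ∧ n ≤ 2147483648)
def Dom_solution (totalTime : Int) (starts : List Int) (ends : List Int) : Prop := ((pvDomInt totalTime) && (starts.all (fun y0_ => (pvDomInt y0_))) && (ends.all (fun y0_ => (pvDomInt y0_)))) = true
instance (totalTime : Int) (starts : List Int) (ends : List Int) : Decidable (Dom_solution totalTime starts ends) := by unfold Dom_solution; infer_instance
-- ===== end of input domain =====

-- B replaces A's sort of all gaps + per-meeting ranked scan + hand-rolled max-heap by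
-- prefix/suffix running maxima with an O(1) movability test per meeting and a running max.


-- ===== PORT A =====

-- sift-up loop of maxheapPush ('while start>0: …'); terminates because prev < start
def pvSiftLoop (h : List Int) (start : Nat) : List Int :=
  if 0 < start then
    let prev := (start - 1) / 2
    if h.getD prev 0 ≥ h.getD start 0 then h
    else pvSiftLoop ((h.set prev (h.getD start 0)).set start (h.getD prev 0)) prev
  else h
termination_by start
decreasing_by omega

def pvMaxheapPush (heap : List Int) (elem : Int) : List Int :=
  pvSiftLoop (heap ++ [elem]) heap.length

def pvGapArrGen (total : Int) (starts ends : List Int) : List Int :=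
  ((PySem.List.pyRange 1 starts.length 1).foldl
    (fun r i => r ++ [PySem.List.pyGetD starts i 0 - PySem.List.pyGetD ends (i - 1) 0])
    [PySem.List.pyGetD starts 0 0])
  ++ [total - PySem.List.pyGetD ends (-1) 0]

def pvSlidingWindowFindDouble (g : List Int) : Int :=
  (PySem.List.pyRange 2 g.length 1).foldl
    (fun res i =>
      let loc := PySem.List.pyGetD g (i - 1) 0 + PySem.List.pyGetD g i 0
      if loc > res then loc else res)
    (PySem.List.pyGetD g 0 0 + PySem.List.pyGetD g 1 0)

def pvMovabilityCheck (dur : Int) (mInd : Int) : List (Int × Int) → Bool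
  | [] => false            -- loop falls through: Python returns None, used as falsy
  | (g, gi) :: rest =>
    if dur > g then false
    else if gi - mInd == 1 || gi - mInd == 0 then pvMovabilityCheck dur mInd rest
    else true

def solution (totalTime : Int) (starts : List Int) (ends : List Int) : Int :=
  let gapArr := pvGapArrGen totalTime starts ends
  let tagged := (PySem.List.pyRange 0 gapArr.length 1).foldl
      (fun r i => r ++ [(PySem.List.pyGetD gapArr i 0, i)]) []
  let taggedGapRank := PySem.List.sorted tagged (fun x => x.1) true
  let heap := (PySem.List.pyRange 0 starts.length 1).foldl
      (fun h i =>
        if pvMovabilityCheck (PySem.List.pyGetD ends i 0 - PySem.List.pyGetD starts i 0) i taggedGapRank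
        then pvMaxheapPush h (PySem.List.pyGetD ends i 0 - PySem.List.pyGetD starts i 0
               + PySem.List.pyGetD gapArr i 0 + PySem.List.pyGetD gapArr (i + 1) 0)
        else h) []
  let double := pvSlidingWindowFindDouble gapArr
  if heap ≠ [] then max double (heap.getD 0 0) else double

-- ===== PORT B =====

-- pre = [gaps[0]]; for g in gaps[1:]: pre.append(max(pre[-1], g))
def pvScanMax (a : Int) : List Int → List Int
  | [] => [a]
  | g :: rest => a :: pvScanMax (max a g) rest

def solution_alt (totalTime : Int) (starts : List Int) (ends : List Int) : Int :=
  let n := starts.length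
  let gaps := starts.getD 0 0 ::
      (((starts.drop 1).zip ends).map (fun p => p.1 - p.2) ++ [totalTime - ends.getLastD 0])
  let adj := (gaps.zip (gaps.drop 1)).map (fun p => p.1 + p.2)
  let best := (adj.drop 1).foldl max (adj.getD 0 0)     -- max(x+y for …), nonempty under Pre
  let pre := pvScanMax (gaps.getD 0 0) (gaps.drop 1)
  let suf := (pvScanMax (gaps.getLastD 0) gaps.dropLast.reverse).reverse
  (List.range n).foldl
    (fun b i =>
      let dur := ends.getD i 0 - starts.getD i 0
      if (1 ≤ i ∧ dur ≤ pre.getD (i - 1) 0) ∨ (i + 2 ≤ n ∧ dur ≤ suf.getD (i + 2) 0)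
      then max b (dur + gaps.getD i 0 + gaps.getD (i + 1) 0) else b)
    best

-- ===== PRECONDITION & SPEC =====
-- Pre_ excludes exactly the inputs where A raises IndexError: no meeting at all, or
-- fewer ends than starts (then ends[i] in the main loop is out of range).
def Pre_solution (totalTime : Int) (starts : List Int) (ends : List Int) : Prop :=
  starts ≠ [] ∧ starts.length ≤ ends.length
instance (totalTime : Int) (starts : List Int) (ends : List Int) : Decidable (Pre_solution totalTime starts ends) := by unfold Pre_solution; infer_instance

def pvWitness_solution : Int × List Int × List Int := (10, ([1, 3], [2, 5]))

def Spec_solution (totalTime : Int) (starts : List Int) (ends : List Int) (out : Int) : Prop := out = solution_alt totalTime starts ends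
instance (totalTime : Int) (starts : List Int) (ends : List Int) (out : Int) : Decidable (Spec_solution totalTime starts ends out) := by unfold Spec_solution; infer_instance

-- ===== CLAIM (what is proved, stated in full; the proofs are below) =====
def Claim_equal_solution : Prop := ∀ (totalTime : Int) (starts : List Int) (ends : List Int), Dom_solution totalTime starts ends → Pre_solution totalTime starts ends → Spec_solution totalTime starts ends (solution totalTime starts ends)

-- ===== LEMMAS AND PROOFS =====

-- ---------- generic max-fold facts ----------
theorem pvLeFoldlMax (l : List Int) : ∀ (a x : Int), (x ≤ l.foldl max a ↔ x ≤ a ∨ ∃ y ∈ l, x ≤ y) := by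
  induction l with
  | nil => simp
  | cons g t ih =>
    intro a x
    rw [List.foldl_cons, ih (max a g) x, le_max_iff]
    constructor
    · rintro ((h | h) | ⟨y, hy, hxy⟩)
      · exact Or.inl h
      · exact Or.inr ⟨g, List.mem_cons_self, h⟩
      · exact Or.inr ⟨y, List.mem_cons_of_mem g hy, hxy⟩
    · rintro (h | ⟨y, hy, hxy⟩)
      · exact Or.inl (Or.inl h)
      · rcases List.mem_cons.1 hy with rfl | hy
        · exact Or.inl (Or.inr hxy)
        · exact Or.inr ⟨y, hy, hxy⟩

theorem pvFoldlMaxLe (l : List Int) : ∀ (a c : Int), (l.foldl max a ≤ c ↔ a ≤ c ∧ ∀ y ∈ l, y ≤ c) := by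
  induction l with
  | nil => simp
  | cons g t ih =>
    intro a c
    rw [List.foldl_cons, ih (max a g) c, max_le_iff]
    constructor
    · rintro ⟨⟨h1, h2⟩, h3⟩
      refine ⟨h1, ?_⟩
      intro y hy
      rcases List.mem_cons.1 hy with rfl | hy
      · exact h2
      · exact h3 y hy
    · rintro ⟨h1, h2⟩
      exact ⟨⟨h1, h2 g List.mem_cons_self⟩, fun y hy => h2 y (List.mem_cons_of_mem g hy)⟩

theorem pvFoldlMaxEq (l : List Int) (d r : Int) (hmem : r ∈ l) (hub : ∀ x ∈ l, x ≤ r) :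
    l.foldl max d = max d r := by
  apply le_antisymm
  · exact (pvFoldlMaxLe l d (max d r)).2 ⟨le_max_left _ _, fun y hy => le_trans (hub y hy) (le_max_right _ _)⟩
  · apply max_le
    · exact (pvLeFoldlMax l d d).2 (Or.inl le_rfl)
    · exact (pvLeFoldlMax l d r).2 (Or.inr ⟨r, hmem, le_rfl⟩)

-- ---------- scanMax facts ----------
theorem pvScanMax_length (l : List Int) : ∀ a, (pvScanMax a l).length = l.length + 1 := by
  induction l with
  | nil => intro a; rfl
  | cons g t ih => intro a; simp [pvScanMax, ih]

theorem pvScanMax_getD (l : List Int) : ∀ (a : Int) (k : Nat), k ≤ l.length →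
    (pvScanMax a l).getD k 0 = (l.take k).foldl max a := by
  induction l with
  | nil =>
    intro a k hk
    have : k = 0 := Nat.le_zero.1 hk
    subst this; rfl
  | cons g t ih =>
    intro a k hk
    cases k with
    | zero => rfl
    | succ k => simpa [pvScanMax] using ih (max a g) k (by simpa using hk)

-- ---------- swap is a permutation ----------
theorem pvConsSetPerm (x : Int) : ∀ (t : List Int) (k : Nat), k < t.length →
    (t.getD k 0 :: t.set k x).Perm (x :: t) := by
  intro t
  induction t with
  | nil => intro k hk; simp at hk
  | cons y t' ih =>
    intro k hk
    cases k with
    | zero => simpa using List.Perm.swap x y t'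
    | succ k =>
      have h1 : (t'.getD k 0 :: y :: t'.set k x).Perm (y :: t'.getD k 0 :: t'.set k x) :=
        List.Perm.swap y (t'.getD k 0) _
      have h2 : (y :: t'.getD k 0 :: t'.set k x).Perm (y :: x :: t') :=
        List.Perm.cons y (ih k (by simpa using hk))
      have h3 : (y :: x :: t').Perm (x :: y :: t') := List.Perm.swap x y t'
      simpa using (h1.trans h2).trans h3

theorem pvSwapPerm : ∀ (l : List Int) (p s : Nat), p < s → s < l.length →
    ((l.set p (l.getD s 0)).set s (l.getD p 0)).Perm l := by
  intro l
  induction l with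
  | nil => intro p s _ hs; simp at hs
  | cons x t ih =>
    intro p s hps hs
    cases p with
    | zero =>
      cases s with
      | zero => omega
      | succ s' => simpa using pvConsSetPerm x t s' (by simpa using hs)
    | succ p' =>
      cases s with
      | zero => omega
      | succ s' => simpa using List.Perm.cons x (ih p' s' (by omega) (by simpa using hs))

theorem pvSiftLoopPerm (s : Nat) : ∀ (h : List Int), s < h.length → (pvSiftLoop h s).Perm h := by
  induction s using Nat.strong_induction_on with
  | _ s ih =>
    intro h hs
    rw [pvSiftLoop]
    split
    case isTrue h0 =>
      show (if h.getD ((s - 1) / 2) 0 ≥ h.getD s 0 then h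
        else pvSiftLoop ((h.set ((s - 1) / 2) (h.getD s 0)).set s (h.getD ((s - 1) / 2) 0)) ((s - 1) / 2)).Perm h
      split
      case isTrue hge => exact List.Perm.refl h
      case isFalse hge =>
        have hlt : (s - 1) / 2 < s := by omega
        exact (ih _ hlt _ (by simp; omega)).trans (pvSwapPerm h _ s hlt hs)
    case isFalse h0 => exact List.Perm.refl h

-- ---------- heap order ----------
def PvHeapOrd (h : List Int) : Prop := ∀ j, 0 < j → j < h.length → h.getD j 0 ≤ h.getD ((j - 1) / 2) 0

def PvInv (h : List Int) (s : Nat) : Prop :=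
  (∀ j, 0 < j → j < h.length → j ≠ s → h.getD j 0 ≤ h.getD ((j - 1) / 2) 0) ∧
  (0 < s → ∀ c, c < h.length → (c - 1) / 2 = s → h.getD c 0 ≤ h.getD ((s - 1) / 2) 0)

theorem pvGetDSet (l : List Int) (i : Nat) (a : Int) (j : Nat) (hi : i < l.length) :
    (l.set i a).getD j 0 = if j = i then a else l.getD j 0 := by
  by_cases hj : j = i
  · subst hj
    simp [List.getD, hi]
  · simp [List.getD, List.getElem?_set_ne (by omega : i ≠ j), hj]

theorem pvSiftLoopHeapOrd (s : Nat) : ∀ (h : List Int), s < h.length → PvInv h s →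
    PvHeapOrd (pvSiftLoop h s) := by
  induction s using Nat.strong_induction_on with
  | _ s ih =>
    intro h hs hinv
    rw [pvSiftLoop]
    split
    case isFalse h0 =>
      intro j hj0 hjl
      exact hinv.1 j hj0 hjl (by omega)
    case isTrue h0 =>
      show PvHeapOrd (if h.getD ((s - 1) / 2) 0 ≥ h.getD s 0 then h
        else pvSiftLoop ((h.set ((s - 1) / 2) (h.getD s 0)).set s (h.getD ((s - 1) / 2) 0)) ((s - 1) / 2))
      split
      case isTrue hge =>
        intro j hj0 hjl
        by_cases hjs : j = s
        · subst hjs; exact hge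
        · exact hinv.1 j hj0 hjl hjs
      case isFalse hge =>
        have hps : (s - 1) / 2 < s := by omega
        have hpl : (s - 1) / 2 < h.length := by omega
        set p := (s - 1) / 2 with hp
        set a := h.getD p 0 with ha
        set b := h.getD s 0 with hb
        have hab : a < b := by omega
        have hgd : ∀ j, ((h.set p b).set s a).getD j 0 =
            if j = s then a else if j = p then b else h.getD j 0 := by
          intro j
          rw [pvGetDSet _ s a j (by simpa using hs), pvGetDSet _ p b j hpl]
        apply ih p hps _ (by simpa using hpl)
        constructor
        · intro j hj0 hjl hjp
          rw [List.length_set, List.length_set] at hjl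
          rw [hgd j, hgd ((j - 1) / 2)]
          by_cases hjs : j = s
          · rw [if_pos hjs]
            have hqp : (j - 1) / 2 = p := by rw [hjs]
            rw [if_neg (show ¬ (j - 1) / 2 = s by omega), if_pos hqp]
            exact le_of_lt hab
          · rw [if_neg hjs, if_neg hjp]
            by_cases hq1 : (j - 1) / 2 = s
            · rw [if_pos hq1]
              have h5 := hinv.2 h0 j hjl hq1
              omega
            · rw [if_neg hq1]
              by_cases hq2 : (j - 1) / 2 = p
              · rw [if_pos hq2]
                have h5 := hinv.1 j hj0 hjl hjs
                rw [hq2] at h5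
                omega
              · rw [if_neg hq2]
                exact hinv.1 j hj0 hjl hjs
        · intro hp0 c hc hcp
          rw [List.length_set, List.length_set] at hc
          rw [hgd c, hgd ((p - 1) / 2)]
          rw [if_neg (show ¬ (p - 1) / 2 = s by omega), if_neg (show ¬ (p - 1) / 2 = p by omega)]
          have hpa : h.getD p 0 ≤ h.getD ((p - 1) / 2) 0 := hinv.1 p hp0 (by omega) (by omega)
          by_cases hcs : c = s
          · rw [if_pos hcs]
            omega
          · rw [if_neg hcs, if_neg (show ¬ c = p by omega)]
            have hc0 : 0 < c := by omega
            have h5 := hinv.1 c hc0 hc hcs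
            rw [hcp] at h5
            omega

theorem pvPushHeapOrd (h : List Int) (e : Int) (hh : PvHeapOrd h) : PvHeapOrd (pvMaxheapPush h e) := by
  apply pvSiftLoopHeapOrd h.length (h ++ [e]) (by simp)
  constructor
  · intro j hj0 hjl hjs
    rw [List.length_append, List.length_singleton] at hjl
    have hj : j < h.length := by omega
    have hq : (j - 1) / 2 < h.length := by omega
    rw [List.getD_append _ _ _ _ hj, List.getD_append _ _ _ _ hq]
    exact hh j hj0 hj
  · intro hs0 c hc hcp
    rw [List.length_append, List.length_singleton] at hc
    omega

theorem pvPushPerm (h : List Int) (e : Int) : (pvMaxheapPush h e).Perm (h ++ [e]) := by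
  exact pvSiftLoopPerm h.length (h ++ [e]) (by simp)

theorem pvHeapOrdRoot (h : List Int) (hh : PvHeapOrd h) : ∀ x ∈ h, x ≤ h.getD 0 0 := by
  have key : ∀ j, j < h.length → h.getD j 0 ≤ h.getD 0 0 := by
    intro j
    induction j using Nat.strong_induction_on with
    | _ j ih =>
      intro hj
      rcases Nat.eq_zero_or_pos j with h0 | h0
      · subst h0; exact le_rfl
      · exact le_trans (hh j h0 hj) (ih ((j - 1) / 2) (by omega) (by omega))
  intro x hx
  obtain ⟨j, hj, rfl⟩ := List.mem_iff_getElem.1 hx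
  have h2 := key j hj
  rwa [List.getD_eq_getElem _ _ hj] at h2

-- ---------- the two guarded folds ----------
theorem pvHeapFold (P : Nat → Prop) [DecidablePred P] (v : Nat → Int) :
    ∀ (l : List Nat) (h₀ : List Int), PvHeapOrd h₀ →
      PvHeapOrd (l.foldl (fun h k => if P k then pvMaxheapPush h (v k) else h) h₀) ∧
      (l.foldl (fun h k => if P k then pvMaxheapPush h (v k) else h) h₀).Perm
        (h₀ ++ (l.filter (fun k => decide (P k))).map v) := by
  intro l
  induction l with
  | nil => intro h₀ hh; exact ⟨hh, by simp⟩
  | cons x t ih =>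
    intro h₀ hh
    by_cases hp : P x
    · have hh1 : PvHeapOrd (pvMaxheapPush h₀ (v x)) := pvPushHeapOrd h₀ (v x) hh
      obtain ⟨ho, hperm⟩ := ih (pvMaxheapPush h₀ (v x)) hh1
      refine ⟨by simpa [hp] using ho, ?_⟩
      have h2 : (pvMaxheapPush h₀ (v x) ++ (t.filter (fun k => decide (P k))).map v).Perm
          ((h₀ ++ [v x]) ++ (t.filter (fun k => decide (P k))).map v) :=
        (pvPushPerm h₀ (v x)).append_right _
      have := hperm.trans h2
      simpa [hp, List.append_assoc] using this
    · obtain ⟨ho, hperm⟩ := ih h₀ hh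
      exact ⟨by simpa [hp] using ho, by simpa [hp] using hperm⟩

theorem pvMaxFold (Q : Nat → Prop) [DecidablePred Q] (v : Nat → Int) :
    ∀ (l : List Nat) (b : Int),
      l.foldl (fun b i => if Q i then max b (v i) else b) b =
        ((l.filter (fun k => decide (Q k))).map v).foldl max b := by
  intro l
  induction l with
  | nil => intro b; rfl
  | cons x t ih => intro b; by_cases hq : Q x <;> simp [hq, ih]

-- ---------- movability, A side ----------
theorem pvMovIff (dur mInd : Int) :
    ∀ (l : List (Int × Int)), l.Pairwise (fun a b => b.1 ≤ a.1) →
      (pvMovabilityCheck dur mInd l = true ↔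
        ∃ p ∈ l, (p.2 - mInd ≠ 1 ∧ p.2 - mInd ≠ 0) ∧ dur ≤ p.1) := by
  intro l
  induction l with
  | nil => simp [pvMovabilityCheck]
  | cons hd t ih =>
    obtain ⟨g, gi⟩ := hd
    intro hp
    rw [List.pairwise_cons] at hp
    rw [pvMovabilityCheck]
    by_cases h1 : dur > g
    · rw [if_pos h1]
      apply iff_of_false (by simp)
      rintro ⟨p, hpmem, _, hdp⟩
      rcases List.mem_cons.1 hpmem with rfl | hpt
      · exact absurd hdp (not_le.mpr h1)
      · have h4 : p.1 ≤ g := hp.1 p hpt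
        omega
    · rw [if_neg h1]
      by_cases h2 : gi - mInd = 1 ∨ gi - mInd = 0
      · have hb : (gi - mInd == 1 || gi - mInd == 0) = true := by
          rcases h2 with h | h <;> simp [h]
        rw [if_pos hb, ih hp.2]
        constructor
        · rintro ⟨p, hpt, hcond, hdp⟩
          exact ⟨p, List.mem_cons_of_mem _ hpt, hcond, hdp⟩
        · rintro ⟨p, hpmem, hcond, hdp⟩
          rcases List.mem_cons.1 hpmem with rfl | hpt
          · rcases h2 with h | h
            · exact absurd h hcond.1
            · exact absurd h hcond.2
          · exact ⟨p, hpt, hcond, hdp⟩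
      · have hc1 : gi - mInd ≠ 1 := fun h => h2 (Or.inl h)
        have hc2 : gi - mInd ≠ 0 := fun h => h2 (Or.inr h)
        have hb : (gi - mInd == 1 || gi - mInd == 0) = false := by simp [hc1, hc2]
        rw [if_neg (by simp [hb])]
        exact iff_of_true rfl ⟨(g, gi), List.mem_cons_self, ⟨hc1, hc2⟩, not_lt.1 h1⟩

-- ---------- getD micro-lemmas ----------
theorem pvGetDElem (g : List Int) (j : Nat) (h : j < g.length) : g.getD j 0 = g[j] :=
  List.getD_eq_getElem g 0 h

theorem pvGetLastD (g : List Int) (h : g ≠ []) : g.getLastD 0 = g.getD (g.length - 1) 0 := by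
  rw [List.getLastD_eq_getLast?, List.getLast?_eq_getLast h]
  show g.getLast h = _
  rw [List.getLast_eq_getElem h,
    pvGetDElem g (g.length - 1) (by have := List.length_pos_of_ne_nil h; omega)]

-- ---------- the gap list ----------
theorem pvGapEq (totalTime : Int) (starts ends : List Int) (hne : starts ≠ [])
    (hlen : starts.length ≤ ends.length) :
    pvGapArrGen totalTime starts ends =
      starts.getD 0 0 ::
        (((starts.drop 1).zip ends).map (fun p => p.1 - p.2) ++ [totalTime - ends.getLastD 0]) := by
  have hn : 0 < starts.length := List.length_pos_of_ne_nil hne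
  have hend : ends ≠ [] := by
    intro h
    rw [h] at hlen
    simp only [List.length_nil] at hlen
    omega
  have hlast : ends.getLast hend = ends.getLastD 0 := by
    rw [List.getLastD_eq_getLast?, List.getLast?_eq_getLast hend]
    rfl
  have hmid : (PySem.List.pyRange 1 (starts.length : Int) 1).map
      (fun i => PySem.List.pyGetD starts i 0 - PySem.List.pyGetD ends (i - 1) 0) =
      ((starts.drop 1).zip ends).map (fun p => p.1 - p.2) := by
    apply List.ext_getElem
    · simp [PySem.List.length_pyRange_one]
      omega
    · intro k h1 h2
      have hk : k + 1 < starts.length := by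
        simp at h2
        omega
      have hke : k < ends.length := by omega
      rw [List.getElem_map, PySem.List.getElem_pyRange_one, List.getElem_map, List.getElem_zip]
      have e1 : (1 : Int) + (k : Int) = ((k + 1 : Nat) : Int) := by push_cast; ring
      rw [e1]
      have e2 : ((k + 1 : Nat) : Int) - 1 = ((k : Nat) : Int) := by push_cast; ring
      rw [e2, PySem.List.pyGetD_natCast, PySem.List.pyGetD_natCast]
      rw [pvGetDElem starts (k + 1) hk, pvGetDElem ends k hke]
      have e3 : (starts.drop 1)[k]'(by simp; omega) = starts[k + 1] := by
        rw [List.getElem_drop]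
        congr 1
        omega
      simp
  unfold pvGapArrGen
  rw [PySem.List.foldl_append_singleton_eq_map]
  rw [PySem.List.pyGetD_zero, PySem.List.pyGetD_neg_one ends 0 hend, hlast, hmid]
  simp

-- ---------- the tagged list ----------
theorem pvTagEq (g : List Int) :
    (PySem.List.pyRange 0 (g.length : Int) 1).foldl (fun r i => r ++ [(PySem.List.pyGetD g i 0, i)]) [] =
      (List.range g.length).map (fun j => (g.getD j 0, (j : Int))) := by
  rw [PySem.List.foldl_append_singleton_eq_map, PySem.List.pyRange_zero_nat, List.map_map]
  simp [Function.comp_def, PySem.List.pyGetD_natCast]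

-- ---------- the double ----------
theorem pvDoubleEq (g : List Int) (hlen2 : 2 ≤ g.length) :
    pvSlidingWindowFindDouble g =
      (((g.zip (g.drop 1)).map (fun p => p.1 + p.2)).drop 1).foldl max
        (((g.zip (g.drop 1)).map (fun p => p.1 + p.2)).getD 0 0) := by
  have hadj : (g.zip (g.drop 1)).map (fun p => p.1 + p.2) =
      (g.getD 0 0 + g.getD 1 0) :: (PySem.List.pyRange 2 (g.length : Int) 1).map
        (fun i => PySem.List.pyGetD g (i - 1) 0 + PySem.List.pyGetD g i 0) := by
    apply List.ext_getElem
    · simp [PySem.List.length_pyRange_one]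
      omega
    · intro k h1 h2
      have hk : k + 1 < g.length := by
        simp at h1
        omega
      match k with
      | 0 =>
        rw [List.getElem_map, List.getElem_zip, List.getElem_cons_zero]
        have e3 : (g.drop 1)[0]'(by simp; omega) = g[1] := by
          rw [List.getElem_drop]
        rw [pvGetDElem g 0 (by omega), pvGetDElem g 1 (by omega)]
        simp
      | k + 1 =>
        rw [List.getElem_map, List.getElem_zip, List.getElem_cons_succ, List.getElem_map,
          PySem.List.getElem_pyRange_one]
        have e1 : (2 : Int) + (k : Int) = ((k + 2 : Nat) : Int) := by push_cast; ring
        rw [e1]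
        have e2 : ((k + 2 : Nat) : Int) - 1 = ((k + 1 : Nat) : Int) := by push_cast; ring
        rw [e2, PySem.List.pyGetD_natCast, PySem.List.pyGetD_natCast]
        rw [pvGetDElem g (k + 1) (by omega), pvGetDElem g (k + 2) (by omega)]
        have e3 : (g.drop 1)[k + 1]'(by simp; omega) = g[k + 2] := by
          rw [List.getElem_drop]
          congr 1
          omega
        simp
  unfold pvSlidingWindowFindDouble
  rw [List.foldl_ext _ (fun res i => max res (PySem.List.pyGetD g (i - 1) 0 + PySem.List.pyGetD g i 0))
      _ (by
        intro res i _
        show (let loc := PySem.List.pyGetD g (i - 1) 0 + PySem.List.pyGetD g i 0;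
          if loc > res then loc else res) = _
        by_cases h : PySem.List.pyGetD g (i - 1) 0 + PySem.List.pyGetD g i 0 > res
        · simp only [h, if_pos]
          exact (max_eq_right h.le).symm
        · simp only [h, if_neg, not_false_iff]
          exact (max_eq_left (not_lt.1 h)).symm)]
  rw [← List.foldl_map, hadj]
  rw [PySem.List.pyGetD_zero, PySem.List.pyGetD_ofNat']
  simp

-- ---------- movability: A side ----------
theorem pvMovAIff (g : List Int) (dur : Int) (i : Nat) :
    (pvMovabilityCheck dur (i : Int)
        (PySem.List.sorted ((List.range g.length).map (fun j => (g.getD j 0, (j : Int))))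
          (fun x => x.1) true) = true)
      ↔ ∃ j, j < g.length ∧ j ≠ i ∧ j ≠ i + 1 ∧ dur ≤ g.getD j 0 := by
  rw [pvMovIff dur (i : Int) _ (PySem.List.sorted_pairwise_rev _ _)]
  constructor
  · rintro ⟨p, hpmem, hcond, hdp⟩
    rw [PySem.List.mem_sorted] at hpmem
    obtain ⟨j, hj, rfl⟩ := List.mem_map.1 hpmem
    rw [List.mem_range] at hj
    have hc1 : (j : Int) - (i : Int) ≠ 1 := hcond.1
    have hc2 : (j : Int) - (i : Int) ≠ 0 := hcond.2
    exact ⟨j, hj, by omega, by omega, hdp⟩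
  · rintro ⟨j, hj, hji, hji1, hdp⟩
    refine ⟨(g.getD j 0, (j : Int)), ?_, ⟨by omega, by omega⟩, hdp⟩
    rw [PySem.List.mem_sorted]
    exact List.mem_map.2 ⟨j, List.mem_range.2 hj, rfl⟩

-- ---------- movability: B side ----------
theorem pvPreIff (g : List Int) (dur : Int) (i : Nat) (hi : i < g.length) :
    ((1 ≤ i ∧ dur ≤ (pvScanMax (g.getD 0 0) (g.drop 1)).getD (i - 1) 0) ↔
      ∃ j, j < i ∧ dur ≤ g.getD j 0) := by
  rcases Nat.eq_zero_or_pos i with h0 | h0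
  · subst h0
    simp
  · have hk : i - 1 ≤ (g.drop 1).length := by simp; omega
    rw [pvScanMax_getD _ _ _ hk, pvLeFoldlMax]
    constructor
    · rintro ⟨_, h | ⟨y, hy, hxy⟩⟩
      · exact ⟨0, by omega, h⟩
      · obtain ⟨m, hm, rfl⟩ := List.mem_take_iff_getElem.1 hy
        have hm' : m < i - 1 := by simp at hm; omega
        have hmg : m + 1 < g.length := by simp at hm; omega
        refine ⟨m + 1, by omega, ?_⟩
        rw [pvGetDElem g (m + 1) hmg]
        have e3 : (g.drop 1)[m]'(by simp; omega) = g[m + 1] := by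
          rw [List.getElem_drop]
          congr 1
          omega
        rwa [e3] at hxy
    · rintro ⟨j, hj, hdj⟩
      refine ⟨h0, ?_⟩
      rcases Nat.eq_zero_or_pos j with hj0 | hj0
      · subst hj0
        exact Or.inl hdj
      · refine Or.inr ⟨g[j], ?_, ?_⟩
        · apply List.mem_take_iff_getElem.2
          refine ⟨j - 1, by simp; omega, ?_⟩
          rw [List.getElem_drop]
          congr 1
          omega
        · rwa [pvGetDElem g j (by omega)] at hdj

theorem pvSufIff (g : List Int) (dur : Int) (k : Nat) (hk : k < g.length) (hg : g ≠ []) :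
    (dur ≤ ((pvScanMax (g.getLastD 0) g.dropLast.reverse).reverse).getD k 0 ↔
      ∃ j, k ≤ j ∧ j < g.length ∧ dur ≤ g.getD j 0) := by
  have hL : 0 < g.length := List.length_pos_of_ne_nil hg
  have hm : g.dropLast.length = g.length - 1 := by simp
  have hsl : (pvScanMax (g.getLastD 0) g.dropLast.reverse).length = g.length := by
    rw [pvScanMax_length]
    simp
    omega
  have hgd : ((pvScanMax (g.getLastD 0) g.dropLast.reverse).reverse).getD k 0 =
      (pvScanMax (g.getLastD 0) g.dropLast.reverse).getD (g.length - 1 - k) 0 := by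
    have h1 : k < ((pvScanMax (g.getLastD 0) g.dropLast.reverse).reverse).length := by
      rw [List.length_reverse, hsl]
      omega
    rw [List.getD_eq_getElem _ _ h1, List.getElem_reverse,
      List.getD_eq_getElem _ _ (by rw [hsl]; omega)]
    congr 1
    rw [hsl]
  rw [hgd, pvScanMax_getD _ _ _ (by simp), pvLeFoldlMax]
  have htake : (g.dropLast.reverse).take (g.length - 1 - k) = (g.dropLast.drop k).reverse := by
    rw [List.take_reverse]
    congr 2
    omega
  rw [htake]
  constructor
  · rintro (h | ⟨y, hy, hxy⟩)
    · refine ⟨g.length - 1, by omega, by omega, ?_⟩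
      rwa [← pvGetLastD g hg]
    · rw [List.mem_reverse] at hy
      obtain ⟨m, hmlt, rfl⟩ := List.mem_drop_iff_getElem.1 hy
      have hmg : k + m < g.length - 1 := by simp at hmlt ⊢; omega
      refine ⟨k + m, by omega, by omega, ?_⟩
      rw [pvGetDElem g (k + m) (by omega)]
      rwa [List.getElem_dropLast] at hxy
  · rintro ⟨j, hjk, hjl, hdj⟩
    rcases Nat.lt_or_ge j (g.length - 1) with hjm | hjm
    · refine Or.inr ⟨g[j], ?_, ?_⟩
      · rw [List.mem_reverse]
        apply List.mem_drop_iff_getElem.2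
        refine ⟨j - k, by simp; omega, ?_⟩
        rw [List.getElem_dropLast]
        congr 1
        omega
      · rwa [pvGetDElem g j hjl] at hdj
    · have hj : j = g.length - 1 := by omega
      subst hj
      left
      rwa [pvGetLastD g hg]

-- ---------- combining the two guarded folds ----------
theorem pvCombine (P : Nat → Prop) [DecidablePred P] (v : Nat → Int) (n : Nat) (D : Int) :
    (if ((List.range n).foldl (fun h k => if P k then pvMaxheapPush h (v k) else h) []) ≠ []
      then max D (((List.range n).foldl (fun h k => if P k then pvMaxheapPush h (v k) else h) []).getD 0 0)
      else D) =
    (List.range n).foldl (fun b i => if P i then max b (v i) else b) D := by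
  obtain ⟨hord, hperm⟩ := pvHeapFold P v (List.range n) [] (by intro j hj0 hjl; simp at hjl)
  rw [List.nil_append] at hperm
  rw [pvMaxFold P v]
  set H := (List.range n).foldl (fun h k => if P k then pvMaxheapPush h (v k) else h) [] with hH
  set cs := ((List.range n).filter (fun k => decide (P k))).map v with hcs
  rcases eq_or_ne cs [] with hnil | hnil
  · rw [hnil] at hperm ⊢
    rw [List.Perm.eq_nil hperm]
    simp
  · have hHne : H ≠ [] := by
      intro h
      rw [h] at hperm
      exact hnil hperm.symm.eq_nil
    rw [if_pos hHne]
    have hpos : 0 < H.length := List.length_pos_of_ne_nil hHne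
    have hroot : H.getD 0 0 ∈ H := by
      rw [List.getD_eq_getElem _ _ hpos]
      exact List.getElem_mem hpos
    have hrootcs : H.getD 0 0 ∈ cs := hperm.mem_iff.1 hroot
    have hub : ∀ x ∈ cs, x ≤ H.getD 0 0 := fun x hx => pvHeapOrdRoot H hord x (hperm.mem_iff.2 hx)
    rw [pvFoldlMaxEq cs D _ hrootcs hub]

-- ---------- main theorem ----------
theorem pvMain (totalTime : Int) (starts ends : List Int)
    (hne : starts ≠ []) (hlen : starts.length ≤ ends.length) :
    solution totalTime starts ends = solution_alt totalTime starts ends := by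
  have hn : 0 < starts.length := List.length_pos_of_ne_nil hne
  simp only [solution, solution_alt, pvGapEq totalTime starts ends hne hlen]
  set g : List Int := starts.getD 0 0 ::
      (((starts.drop 1).zip ends).map (fun p => p.1 - p.2) ++ [totalTime - ends.getLastD 0])
    with hgdef
  have hglen : g.length = starts.length + 1 := by
    rw [hgdef]
    simp [List.length_zip]
    omega
  have hgne : g ≠ [] := by rw [hgdef]; exact List.cons_ne_nil _ _
  rw [pvTagEq g, pvDoubleEq g (by omega)]
  rw [PySem.List.pyRange_zero_nat starts.length, List.foldl_map]
  simp only [← Nat.cast_add_one, PySem.List.pyGetD_natCast]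
  have hmoviff : ∀ k ∈ List.range starts.length,
      ((1 ≤ k ∧ ends.getD k 0 - starts.getD k 0 ≤
            (pvScanMax (g.getD 0 0) (g.drop 1)).getD (k - 1) 0) ∨
          (k + 2 ≤ starts.length ∧ ends.getD k 0 - starts.getD k 0 ≤
            ((pvScanMax (g.getLastD 0) g.dropLast.reverse).reverse).getD (k + 2) 0)) ↔
        (pvMovabilityCheck (ends.getD k 0 - starts.getD k 0) (k : Int)
          (PySem.List.sorted ((List.range g.length).map (fun j => (g.getD j 0, (j : Int))))
            (fun x => x.1) true) = true) := by
    intro k hk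
    rw [List.mem_range] at hk
    rw [pvMovAIff g (ends.getD k 0 - starts.getD k 0) k,
      pvPreIff g (ends.getD k 0 - starts.getD k 0) k (by omega)]
    by_cases hkk : k + 2 ≤ starts.length
    · rw [pvSufIff g (ends.getD k 0 - starts.getD k 0) (k + 2) (by omega) hgne]
      constructor
      · rintro (⟨j, hjk, hdj⟩ | ⟨_, j, hj2, hjg, hdj⟩)
        · exact ⟨j, by omega, by omega, by omega, hdj⟩
        · exact ⟨j, hjg, by omega, by omega, hdj⟩
      · rintro ⟨j, hjg, hji, hji1, hdj⟩
        rcases Nat.lt_or_ge j k with h | h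
        · exact Or.inl ⟨j, h, hdj⟩
        · exact Or.inr ⟨hkk, j, by omega, hjg, hdj⟩
    · simp only [hkk, false_and, or_false]
      constructor
      · rintro ⟨j, hjk, hdj⟩
        exact ⟨j, by omega, by omega, by omega, hdj⟩
      · rintro ⟨j, hjg, hji, hji1, hdj⟩
        exact ⟨j, by omega, hdj⟩
  have hBfold :
      (List.range starts.length).foldl (fun b i =>
        if (1 ≤ i ∧ ends.getD i 0 - starts.getD i 0 ≤
              (pvScanMax (g.getD 0 0) (g.drop 1)).getD (i - 1) 0) ∨
            (i + 2 ≤ starts.length ∧ ends.getD i 0 - starts.getD i 0 ≤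
              ((pvScanMax (g.getLastD 0) g.dropLast.reverse).reverse).getD (i + 2) 0)
        then max b (ends.getD i 0 - starts.getD i 0 + g.getD i 0 + g.getD (i + 1) 0) else b)
        ((((g.zip (g.drop 1)).map (fun p => p.1 + p.2)).drop 1).foldl max
          (((g.zip (g.drop 1)).map (fun p => p.1 + p.2)).getD 0 0)) =
      (List.range starts.length).foldl (fun b i =>
        if (pvMovabilityCheck (ends.getD i 0 - starts.getD i 0) (i : Int)
            (PySem.List.sorted ((List.range g.length).map (fun j => (g.getD j 0, (j : Int))))
              (fun x => x.1) true) = true)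
        then max b (ends.getD i 0 - starts.getD i 0 + g.getD i 0 + g.getD (i + 1) 0) else b)
        ((((g.zip (g.drop 1)).map (fun p => p.1 + p.2)).drop 1).foldl max
          (((g.zip (g.drop 1)).map (fun p => p.1 + p.2)).getD 0 0)) :=
    List.foldl_ext _ _ _ (fun b k hk => if_congr (hmoviff k hk) rfl rfl)
  rw [hBfold]
  exact pvCombine _ _ _ _

-- ===== VERDICT (by name: the statement is the Claim_ definition above) =====
theorem solution_spec : Claim_equal_solution := by
  intro totalTime starts ends _ hpre
  exact pvMain totalTime starts ends hpre.1 hpre.2
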